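-- pv_equiv track=rewrite | github.com/vanman2024/ai-dev-marketplace | plugins/rag-pipeline/skills/chunking-strategies/scripts/chunk-fixed-size.py | _get_overlap_words
-- ===== SOURCE A (Python) =====
-- from typing import List, Dict
--
-- def _get_overlap_words(words: List[str], overlap_size: int) -> List[str]:
--     """Get overlap words based on character size."""
--     overlap_words = []
--     current_size = 0
--
--     for word in reversed(words):
--         word_size = len(word) + 1
--         if current_size + word_size <= overlap_size:
--             overlap_words.insert(0, word)
--             current_size += word_size
--         else:
--             break
--
--     return overlap_words
-- ===== SOURCE B (Python) =====
-- from typing import List, Dict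
--
-- def _get_overlap_words(words: List[str], overlap_size: int) -> List[str]:
--     """Get overlap words based on character size (cumulative-table version)."""
--     rev = words[::-1]
--     totals = []
--     t = 0
--     for w in rev:
--         t += len(w) + 1
--         totals.append(t)
--     k = 0
--     while k < len(totals) and totals[k] <= overlap_size:
--         k += 1
--     return rev[:k][::-1]
-- ===== Notes on version B (the rewrite author's own statement) =====
-- stated objective: faster
-- what changed: Builds the cumulative-size table of the reversed word list once, then counts how many strictly increasing prefix totals fit in overlap_size and slices that many trailing words back into order, instead of a greedy word-by-word loop that breaks early and does insert(0,..) (O(n) shift) per kept word.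
import Mathlib
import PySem

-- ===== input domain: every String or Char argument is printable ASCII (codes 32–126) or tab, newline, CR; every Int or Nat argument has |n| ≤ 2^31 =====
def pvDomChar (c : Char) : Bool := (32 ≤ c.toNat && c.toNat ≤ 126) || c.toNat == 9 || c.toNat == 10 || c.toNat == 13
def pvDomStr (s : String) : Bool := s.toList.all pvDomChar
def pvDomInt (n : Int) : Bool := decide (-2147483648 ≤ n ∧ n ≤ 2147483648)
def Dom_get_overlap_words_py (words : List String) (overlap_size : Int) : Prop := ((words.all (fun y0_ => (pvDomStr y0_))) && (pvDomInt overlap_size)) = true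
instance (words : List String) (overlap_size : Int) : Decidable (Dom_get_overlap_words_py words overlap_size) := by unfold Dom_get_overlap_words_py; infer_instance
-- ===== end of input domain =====

-- B replaces A's greedy break-loop (with insert(0,..)) by a cumulative-size table over the
-- reversed list plus a count-and-slice; same return value, alternative decomposition.

-- ===== PORT A =====
-- the 'for word in reversed(words): … else break' loop; acc is overlap_words (insert(0,w) = prepend)
def pvLoopA (overlap_size : Int) : List String → Int → List String → List String
  | [], _, acc => acc
  | w :: rest, cur, acc =>
    let ws : Int := PySem.Str.len w + 1
    if cur + ws ≤ overlap_size then pvLoopA overlap_size rest (cur + ws) (w :: acc)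
    else acc

def get_overlap_words_py (words : List String) (overlap_size : Int) : List String :=
  pvLoopA overlap_size words.reverse 0 []

-- ===== PORT B =====
-- the cumulative-total table: totals.append(t) with t += len(w)+1
def pvTotals : List String → Int → List Int
  | [], _ => []
  | w :: rest, t =>
    let t' := t + (PySem.Str.len w + 1)
    t' :: pvTotals rest t'

def get_overlap_words_py_alt (words : List String) (overlap_size : Int) : List String :=
  let rev := words.reverse
  let totals := pvTotals rev 0
  let k := (totals.takeWhile (fun t => t ≤ overlap_size)).length
  (rev.take k).reverse

-- ===== PRECONDITION & SPEC =====
def Spec_get_overlap_words_py (words : List String) (overlap_size : Int) (out : List String) : Prop := out = get_overlap_words_py_alt words overlap_size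
instance (words : List String) (overlap_size : Int) (out : List String) : Decidable (Spec_get_overlap_words_py words overlap_size out) := by unfold Spec_get_overlap_words_py; infer_instance

-- ===== CLAIM (what is proved, stated in full; the proofs are below) =====
def Claim_equal_get_overlap_words_py : Prop := ∀ (words : List String) (overlap_size : Int), Dom_get_overlap_words_py words overlap_size → Spec_get_overlap_words_py words overlap_size (get_overlap_words_py words overlap_size)

-- ===== LEMMAS AND PROOFS =====
-- A's loop takes the longest prefix of l whose cumulative totals (from cur) stay ≤ n,
-- reversed, prepended to acc; that prefix length is exactly B's takeWhile count.
theorem pvLoopA_eq (n : Int) (l : List String) (cur : Int) (acc : List String) :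
    pvLoopA n l cur acc =
      (l.take ((pvTotals l cur).takeWhile (fun t => t ≤ n)).length).reverse ++ acc := by
  induction l generalizing cur acc with
  | nil => simp [pvLoopA, pvTotals]
  | cons w rest ih =>
    simp only [pvLoopA, pvTotals, List.takeWhile]
    by_cases h : cur + (PySem.Str.len w + 1) ≤ n
    · simp only [if_pos h, decide_eq_true h, ih]
      simp [List.take_succ_cons]
    · simp only [if_neg h, decide_eq_false h]
      simp

-- ===== VERDICT (by name: the statement is the Claim_ definition above) =====
theorem get_overlap_words_py_spec : Claim_equal_get_overlap_words_py := by
  intro words n _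
  show _ = _
  simp [get_overlap_words_py, get_overlap_words_py_alt, pvLoopA_eq]
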